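-- pv_equiv track=rewrite | github.com/JustinLanier/AutoFFmpeg | AutoFFmpegH265/AutoFFmpegH265.py | calculateChunks
-- ===== SOURCE A (Python) =====
-- def calculateChunks(frameList, chunkSize, minChunks=2):
--     """
--     Calculate chunk ranges for parallel encoding
--
--     Args:
--         frameList: List of frame numbers from the job
--         chunkSize: Target frames per chunk
--         minChunks: Minimum number of chunks to create
--
--     Returns:
--         List of (start_frame, end_frame) tuples or None if chunking not viable
--     """
--     if not frameList or len(frameList) < chunkSize * minChunks:
--         return None
--
--     frameList = sorted(frameList)
--     totalFrames = len(frameList)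
--
--     # Calculate number of chunks
--     numChunks = max(minChunks, (totalFrames + chunkSize - 1) // chunkSize)
--
--     # Calculate actual chunk size (distribute frames evenly)
--     actualChunkSize = (totalFrames + numChunks - 1) // numChunks
--
--     chunks = []
--     for i in range(numChunks):
--         startIdx = i * actualChunkSize
--         endIdx = min((i + 1) * actualChunkSize, totalFrames)
--
--         if startIdx < totalFrames:
--             chunks.append((frameList[startIdx], frameList[endIdx - 1]))
--
--     return chunks
-- ===== SOURCE B (Python) =====
-- def calculateChunks(frameList, chunkSize, minChunks=2):
--     """Single streaming pass: walk the sorted frames once with a running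
--     chunk-start register, opening a chunk at each stride boundary and closing
--     it at the element before the next boundary (or at the final frame)."""
--     if not frameList or len(frameList) < chunkSize * minChunks:
--         return None
--
--     frames = sorted(frameList)
--     total = len(frames)
--
--     numChunks = max(minChunks, -(-total // chunkSize))
--     step = -(-total // numChunks)
--
--     chunks = []
--     start = 0
--     for idx, f in enumerate(frames):
--         if idx % step == 0:
--             start = f
--         if idx % step == step - 1 or idx == total - 1:
--             chunks.append((start, f))
--     return chunks
-- ===== Notes on version B (the rewrite author's own statement) =====
-- stated objective: alternative
-- what changed: Replaces A's loop over chunk indices with random-access indexing (min/endIdx-1/skip arithmetic) by a single streaming pass over the sorted frames: a per-element state machine with a running chunk-start register that opens a chunk at each stride boundary and closes it before the next boundary or at the final frame.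
-- outside the precondition, e.g. on calculateChunks([1], -1, 0): A returns [(1, 1)], B raises ZeroDivisionError
import Mathlib
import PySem

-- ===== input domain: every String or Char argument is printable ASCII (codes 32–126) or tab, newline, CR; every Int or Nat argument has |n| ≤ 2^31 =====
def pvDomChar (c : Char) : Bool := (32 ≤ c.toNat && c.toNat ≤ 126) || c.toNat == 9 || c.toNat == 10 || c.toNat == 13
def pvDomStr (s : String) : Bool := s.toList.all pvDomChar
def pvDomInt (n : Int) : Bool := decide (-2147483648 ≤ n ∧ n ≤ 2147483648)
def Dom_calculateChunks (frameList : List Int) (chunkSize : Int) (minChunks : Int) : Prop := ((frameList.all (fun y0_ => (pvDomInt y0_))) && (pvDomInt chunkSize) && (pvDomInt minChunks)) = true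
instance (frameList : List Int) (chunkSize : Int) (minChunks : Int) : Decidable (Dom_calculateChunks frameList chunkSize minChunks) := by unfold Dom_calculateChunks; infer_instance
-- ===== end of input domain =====

-- B replaces A's loop over chunk indices with random-access indexing (min/endIdx-1/skip
-- arithmetic) by a single streaming pass over the sorted frames: a per-element state machine
-- with a running chunk-start register (alternative decomposition; the guard and the
-- numChunks/step arithmetic are forced by the required output and stay).

-- ===== PORT A =====
-- the two pyGetD indices are always in range under Pre_ (proved below), so the default 0 is never used
def calculateChunks (frameList : List Int) (chunkSize : Int) (minChunks : Int) : Option (List (Int × Int)) :=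
  if frameList = [] ∨ (frameList.length : Int) < chunkSize * minChunks then none
  else
    let fl := PySem.List.sorted frameList id
    let totalFrames : Int := (fl.length : Int)
    let numChunks : Int := max minChunks (PySem.Int.floordiv (totalFrames + chunkSize - 1) chunkSize)
    let actualChunkSize : Int := PySem.Int.floordiv (totalFrames + numChunks - 1) numChunks
    some ((PySem.List.pyRange 0 numChunks 1).foldl (fun chunks i =>
      let startIdx := i * actualChunkSize
      let endIdx := min ((i + 1) * actualChunkSize) totalFrames
      if startIdx < totalFrames then
        chunks ++ [(PySem.List.pyGetD fl startIdx 0, PySem.List.pyGetD fl (endIdx - 1) 0)]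
      else chunks) [])

-- ===== PORT B =====
def calculateChunks_alt (frameList : List Int) (chunkSize : Int) (minChunks : Int) : Option (List (Int × Int)) :=
  if frameList = [] ∨ (frameList.length : Int) < chunkSize * minChunks then none
  else
    let frames := PySem.List.sorted frameList id
    let total : Int := (frames.length : Int)
    let numChunks : Int := max minChunks (-(PySem.Int.floordiv (-total) chunkSize))
    let step : Int := -(PySem.Int.floordiv (-total) numChunks)
    some (((PySem.List.enumerate frames 0).foldl (fun (st : List (Int × Int) × Int) p =>
      let start := if PySem.Int.mod p.1 step = 0 then p.2 else st.2
      if PySem.Int.mod p.1 step = step - 1 ∨ p.1 = total - 1 then (st.1 ++ [(start, p.2)], start)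
      else (st.1, start)) ([], 0)).1)

-- ===== PRECONDITION & SPEC =====
-- Pre_ excludes only inputs with a nonpositive chunkSize that pass the size guard: there A
-- raises ZeroDivisionError (chunkSize = 0, or numChunks = 0) or returns accidental values of
-- its negative floor-division arithmetic.
def Pre_calculateChunks (frameList : List Int) (chunkSize : Int) (minChunks : Int) : Prop :=
  1 ≤ chunkSize ∨ frameList = [] ∨ (frameList.length : Int) < chunkSize * minChunks
instance (frameList : List Int) (chunkSize : Int) (minChunks : Int) : Decidable (Pre_calculateChunks frameList chunkSize minChunks) := by unfold Pre_calculateChunks; infer_instance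

def pvWitness_calculateChunks : List Int × Int × Int := ([3, 1, 2, 6, 5, 4], 2, 2)

def Spec_calculateChunks (frameList : List Int) (chunkSize : Int) (minChunks : Int) (out : Option (List (Int × Int))) : Prop := out = calculateChunks_alt frameList chunkSize minChunks
instance (frameList : List Int) (chunkSize : Int) (minChunks : Int) (out : Option (List (Int × Int))) : Decidable (Spec_calculateChunks frameList chunkSize minChunks out) := by unfold Spec_calculateChunks; infer_instance

-- ===== CLAIM (what is proved, stated in full; the proofs are below) =====
def Claim_equal_calculateChunks : Prop := ∀ (frameList : List Int) (chunkSize : Int) (minChunks : Int), Dom_calculateChunks frameList chunkSize minChunks → Pre_calculateChunks frameList chunkSize minChunks → Spec_calculateChunks frameList chunkSize minChunks (calculateChunks frameList chunkSize minChunks)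

-- ===== LEMMAS AND PROOFS =====

-- the pair emitted for chunk k (both loops produce exactly these)
def pvPair (fl : List Int) (t s : Int) (k : ℕ) : Int × Int :=
  (PySem.List.pyGetD fl ((k : ℤ) * s) 0, PySem.List.pyGetD fl (min (((k : ℤ) + 1) * s) t - 1) 0)

-- ceiling division: Python's -(-t // d) equals (t + d - 1) // d for positive d
lemma pv_ceil_eq (t d : Int) (hd : 0 < d) :
    -(PySem.Int.floordiv (-t) d) = PySem.Int.floordiv (t + d - 1) d := by
  have hb := (PySem.Int.floordiv_eq_iff_of_pos (a := t + d - 1) (b := d)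
      (q := PySem.Int.floordiv (t + d - 1) d) hd).mp rfl
  rw [PySem.Int.neg_floordiv_neg_eq_iff_of_pos hd]
  constructor <;> nlinarith [hb.1, hb.2]

-- Prop-valued version of PySem.List.foldl_append_if
lemma pv_foldl_append_ite {α β : Type} (p : α → Prop) [DecidablePred p] (f : α → β) (l : List α) :
    l.foldl (fun acc x => if p x then acc ++ [f x] else acc) []
      = (l.filter (fun x => decide (p x))).map f := by
  have h := PySem.List.foldl_append_if (fun x => decide (p x)) f l []
  simpa [decide_eq_true_eq] using h

lemma pv_filter_range (K N : ℕ) (p : ℕ → Bool) (hK : K ≤ N) (hp : ∀ k, p k = true ↔ k < K) :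
    (List.range N).filter p = List.range K := by
  have hN : N = K + (N - K) := by omega
  rw [hN, List.range_add, List.filter_append]
  rw [List.filter_eq_self.mpr, List.filter_eq_nil_iff.mpr, List.append_nil]
  · intro a ha
    simp only [List.mem_map, List.mem_range] at ha
    obtain ⟨c, _, rfl⟩ := ha
    rw [hp]; omega
  · intro a ha; rw [hp]; exact List.mem_range.mp ha

-- A's index loop produces exactly the chunk pairs for k < K = ceil(t / acs)
lemma pv_A_map (fl : List Int) (t n acs : Int)
    (ht : t = (fl.length : Int)) (h1 : 1 ≤ t) (hn : 1 ≤ n)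
    (hacs : acs = PySem.Int.floordiv (t + n - 1) n) :
    (PySem.List.pyRange 0 n 1).foldl (fun chunks i =>
      if i * acs < t then
        chunks ++ [(PySem.List.pyGetD fl (i * acs) 0,
                    PySem.List.pyGetD fl (min ((i + 1) * acs) t - 1) 0)]
      else chunks) []
    = (List.range ((t + acs - 1) / acs).toNat).map (pvPair fl t acs) := by
  have hn0 : (0:ℤ) < n := by omega
  have hacs1 : 1 ≤ acs := by
    rw [hacs, PySem.Int.le_floordiv_iff_mul_le hn0]; nlinarith
  have hbr := (PySem.Int.floordiv_eq_iff_of_pos (a := t + n - 1) (b := n) (q := acs) hn0).mp hacs.symm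
  have htn : t ≤ n * acs := by nlinarith [hbr.1, hbr.2]
  have hacs0 : (0:ℤ) < acs := by omega
  set K : ℕ := ((t + acs - 1) / acs).toNat with hK
  have hKcast : (K : ℤ) = (t + acs - 1) / acs := by
    rw [hK]; exact Int.toNat_of_nonneg (Int.ediv_nonneg (by omega) (by omega))
  have hcond : ∀ k : ℕ, ((k : ℤ) * acs < t) ↔ k < K := by
    intro k
    have h1' : ((k:ℤ) + 1 ≤ (t + acs - 1) / acs) ↔ ((k:ℤ) + 1) * acs ≤ t + acs - 1 :=
      Int.le_ediv_iff_mul_le hacs0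
    constructor
    · intro h
      have : ((k:ℤ) + 1) * acs ≤ t + acs - 1 := by nlinarith
      have := h1'.mpr this
      omega
    · intro h
      have : (k:ℤ) + 1 ≤ (t + acs - 1) / acs := by omega
      have := h1'.mp this
      nlinarith
  have hKn : K ≤ n.toNat := by
    have : (t + acs - 1) / acs < n + 1 := by
      rw [Int.ediv_lt_iff_lt_mul hacs0]; nlinarith
    omega
  rw [PySem.List.pyRange_of_pos 0 n (by norm_num : (0:ℤ) < 1)]
  rw [if_pos (by omega : (0:ℤ) < n)]
  have e1 : ((n - 0 + 1 - 1) / 1).toNat = n.toNat := by norm_num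
  rw [e1, List.foldl_map]
  have e2 : (fun (chunks : List (Int × Int)) (k : ℕ) =>
      if (0 + 1 * (k:ℤ)) * acs < t then
        chunks ++ [(PySem.List.pyGetD fl ((0 + 1 * (k:ℤ)) * acs) 0,
                    PySem.List.pyGetD fl (min ((0 + 1 * (k:ℤ) + 1) * acs) t - 1) 0)]
      else chunks)
      = (fun (chunks : List (Int × Int)) (k : ℕ) =>
      if ((k:ℤ)) * acs < t then chunks ++ [pvPair fl t acs k] else chunks) := by
    funext chunks k; simp only [pvPair]; norm_num
  rw [e2]
  rw [pv_foldl_append_ite (fun k : ℕ => ((k:ℤ)) * acs < t) (pvPair fl t acs) (List.range n.toNat)]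
  rw [pv_filter_range K n.toNat _ hKn (by intro k; simp [hcond k])]

-- B's streaming loop, generalized invariant: processing the suffix fl.drop j (enumerated
-- from j) with a start register valid for the current chunk appends exactly the pairs of
-- the remaining chunks
lemma pv_B_loop (fl : List Int) (st : ℕ) (hst : 1 ≤ st) :
    ∀ (l : List Int) (j : ℕ) (acc : List (Int × Int)) (s0 : Int),
    fl.drop j = l →
    (j % st ≠ 0 → s0 = PySem.List.pyGetD fl ((st * (j / st) : ℕ) : ℤ) 0) →
    ((PySem.List.enumerate l (j : ℤ)).foldl
      (fun (stt : List (Int × Int) × Int) p =>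
        let start := if PySem.Int.mod p.1 (st : ℤ) = 0 then p.2 else stt.2
        if PySem.Int.mod p.1 (st : ℤ) = (st : ℤ) - 1 ∨ p.1 = (fl.length : ℤ) - 1
        then (stt.1 ++ [(start, p.2)], start)
        else (stt.1, start)) (acc, s0)).1
    = acc ++ (if j < fl.length then
        (List.range' (j / st) ((fl.length + st - 1) / st - j / st)).map
          (pvPair fl (fl.length : ℤ) (st : ℤ))
      else []) := by
  intro l
  induction l with
  | nil =>
    intro j acc s0 hdrop _
    have hj : ¬ j < fl.length := by
      have := congrArg List.length hdrop
      simp [List.length_drop] at this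
      omega
    simp [PySem.List.enumerate_nil, hj]
  | cons x rest ih =>
    intro j acc s0 hdrop hstart
    have hlen : fl.length - j = rest.length + 1 := by
      have := congrArg List.length hdrop
      simpa [List.length_drop] using this
    have hjlen : j < fl.length := by omega
    have hx : PySem.List.pyGetD fl (j : ℤ) 0 = x := by
      rw [PySem.List.pyGetD_natCast]
      have h0 : fl[j]? = some x := by
        have h := List.getElem?_drop (xs := fl) (i := j) (j := 0)
        rw [hdrop] at h
        simpa using h.symm
      rw [List.getD_eq_getElem?_getD, h0]
      rfl
    have hdrop' : fl.drop (j + 1) = rest := by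
      have : fl.drop (j + 1) = List.drop 1 (fl.drop j) := by
        rw [List.drop_drop]
      rw [this, hdrop]
      rfl
    -- divmod bookkeeping
    have hst0 : 0 < st := hst
    have hdm := Nat.div_add_mod j st
    have hmlt := Nat.mod_lt j hst0
    set q := j / st with hq
    set r := j % st with hr
    have hmodc : PySem.Int.mod (j : ℤ) (st : ℤ) = ((r : ℕ) : ℤ) := by
      rw [PySem.Int.mod_natCast]
    rw [PySem.List.enumerate_cons, List.foldl_cons]
    -- the start register after this element
    have hs1 : (if PySem.Int.mod (j:ℤ) (st:ℤ) = 0 then x else s0)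
        = PySem.List.pyGetD fl ((st * q : ℕ) : ℤ) 0 := by
      by_cases hr0 : r = 0
      · rw [if_pos (by rw [hmodc, hr0]; norm_num)]
        have : st * q = j := by omega
        rw [this, hx]
      · rw [if_neg (by rw [hmodc]; exact_mod_cast hr0)]
        exact hstart (by omega)
    have hstart' : ((j + 1) % st ≠ 0 →
        (if PySem.Int.mod (j:ℤ) (st:ℤ) = 0 then x else s0)
          = PySem.List.pyGetD fl ((st * ((j + 1) / st) : ℕ) : ℤ) 0) := by
      intro hne
      have hrne : r ≠ st - 1 := by
        intro hcontra
        have e2 : st * (q + 1) = st * q + st := by ring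
        have : j + 1 = st * (q + 1) := by omega
        rw [this, Nat.mul_mod_right] at hne
        exact hne rfl
      have hj1 : j + 1 = st * q + (r + 1) := by omega
      have hdiv : (j + 1) / st = q := by
        rw [hj1, Nat.mul_add_div hst0, Nat.div_eq_of_lt (by omega)]
        omega
      rw [hdiv]
      exact hs1
    -- number of chunks
    set T := fl.length with hT
    set K := (T + st - 1) / st with hK
    have hKeq : K = (T - 1) / st + 1 := by
      have : T + st - 1 = (T - 1) + st := by omega
      rw [hK, this, Nat.add_div_right _ hst0]
    have hqle : q ≤ (T - 1) / st := Nat.div_le_div_right (by omega)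
    by_cases happ : r = st - 1 ∨ j = T - 1
    · -- append branch
      have hcondI : PySem.Int.mod (j:ℤ) (st:ℤ) = (st:ℤ) - 1 ∨ (j:ℤ) = (T:ℤ) - 1 := by
        rcases happ with h | h
        · left; rw [hmodc, h]; omega
        · right; omega
      rw [if_pos hcondI]
      -- the appended pair is pvPair q
      have hmin : min ((q + 1) * st) T = j + 1 := by
        have e2 : (q + 1) * st = st * q + st := by ring
        rcases happ with h | h
        · omega
        · omega
      have hpair : ((if PySem.Int.mod (j:ℤ) (st:ℤ) = 0 then x else s0), x)
          = pvPair fl (T : ℤ) (st : ℤ) q := by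
        rw [pvPair]
        simp only [Prod.mk.injEq]
        constructor
        · rw [hs1]; congr 1; push_cast; ring
        · have e : min (((q:ℤ) + 1) * (st:ℤ)) (T:ℤ) - 1 = (j:ℤ) := by
            have : ((min ((q + 1) * st) T : ℕ) : ℤ) = min (((q:ℤ) + 1) * (st:ℤ)) (T:ℤ) := by
              push_cast; rfl
            omega
          rw [e, hx]
      by_cases hT1 : j + 1 < T
      · -- more chunks follow: r = st - 1 here (j ≠ T - 1)
        have hrst : r = st - 1 := by
          rcases happ with h | h
          · exact h
          · omega
        have hdiv' : (j + 1) / st = q + 1 := by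
          have e2 : st * (q + 1) = st * q + st := by ring
          have : j + 1 = st * (q + 1) := by omega
          rw [this, Nat.mul_div_cancel_left _ hst0]
        dsimp only
        have ecast : ((j:ℤ) + 1) = ((j + 1 : ℕ) : ℤ) := by push_cast; ring
        rw [ecast]
        rw [ih (j + 1) (acc ++ [((if PySem.Int.mod (j:ℤ) (st:ℤ) = 0 then x else s0), x)])
            _ hdrop' hstart']
        rw [if_pos hT1, if_pos hjlen, hdiv']
        have hqK : q + 1 ≤ K := by
          have : j + 1 ≤ T - 1 := by omega
          have := Nat.div_le_div_right (c := st) this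
          omega
        have hrange : List.range' q (K - q) = q :: List.range' (q + 1) (K - (q + 1)) := by
          have : K - q = (K - (q + 1)) + 1 := by omega
          rw [this, List.range'_succ]
        rw [hrange, List.map_cons, hpair]
        simp
      · -- last chunk: rest is empty
        have hrest : rest = [] := by
          have : rest.length = 0 := by omega
          exact List.eq_nil_of_length_eq_zero this
        subst hrest
        simp only [PySem.List.enumerate_nil, List.foldl_nil]
        have hjT : j = T - 1 := by omega
        have hqK : K - q = 1 := by
          have : q = (T - 1) / st := by rw [hq, hjT]
          omega
        rw [if_pos hjlen, hqK, List.range'_one, List.map_cons, List.map_nil, hpair]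
    · -- no-append branch
      push Not at happ
      obtain ⟨hrne, hjne⟩ := happ
      have hcondI : ¬ (PySem.Int.mod (j:ℤ) (st:ℤ) = (st:ℤ) - 1 ∨ (j:ℤ) = (T:ℤ) - 1) := by
        push Not
        constructor
        · rw [hmodc]; omega
        · omega
      rw [if_neg hcondI]
      have hj1 : j + 1 = st * q + (r + 1) := by omega
      have hdiv' : (j + 1) / st = q := by
        rw [hj1, Nat.mul_add_div hst0, Nat.div_eq_of_lt (by omega)]
        omega
      have hT1 : j + 1 < T := by omega
      dsimp only
      have ecast : ((j:ℤ) + 1) = ((j + 1 : ℕ) : ℤ) := by push_cast; ring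
      rw [ecast]
      rw [ih (j + 1) acc _ hdrop' hstart']
      rw [if_pos hT1, if_pos hjlen, hdiv']

-- ===== VERDICT (by name: the statement is the Claim_ definition above) =====
theorem calculateChunks_spec : Claim_equal_calculateChunks := by
  intro frameList chunkSize minChunks _ hpre
  unfold Spec_calculateChunks calculateChunks calculateChunks_alt
  by_cases hc : frameList = [] ∨ (frameList.length : Int) < chunkSize * minChunks
  · simp only [if_pos hc]
  · have hcs : (0:ℤ) < chunkSize := by
      rcases hpre with h | h
      · omega
      · exact absurd h hc
    simp only [if_neg hc]
    push Not at hc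
    obtain ⟨hne, hlen⟩ := hc
    have hflen : (PySem.List.sorted frameList id).length = frameList.length :=
      (PySem.List.sorted_perm frameList id false).length_eq
    set fl := PySem.List.sorted frameList id with hfl
    have h1 : (1:ℤ) ≤ (fl.length : Int) := by
      rw [hflen]
      have : frameList.length ≠ 0 := fun h => hne (List.eq_nil_of_length_eq_zero h)
      omega
    rw [pv_ceil_eq _ _ hcs]
    set t : Int := (fl.length : Int) with hts
    set n : Int := max minChunks (PySem.Int.floordiv (t + chunkSize - 1) chunkSize) with hns
    have hn : 1 ≤ n := by
      have : (1:ℤ) ≤ PySem.Int.floordiv (t + chunkSize - 1) chunkSize := by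
        rw [PySem.Int.le_floordiv_iff_mul_le hcs]; nlinarith
      exact le_trans this (le_max_right _ _)
    rw [pv_ceil_eq _ _ (by omega : (0:ℤ) < n)]
    set acs : Int := PySem.Int.floordiv (t + n - 1) n with hacss
    have hacs1 : 1 ≤ acs := by
      rw [hacss, PySem.Int.le_floordiv_iff_mul_le (by omega : (0:ℤ) < n)]; nlinarith
    congr 1
    rw [pv_A_map fl t n acs hts h1 hn hacss]
    -- B side: the streaming fold over the enumerated frames
    set st : ℕ := acs.toNat with hst
    have hstc : (st : ℤ) = acs := by omega
    have hst1 : 1 ≤ st := by omega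
    have hB := pv_B_loop fl st hst1 fl 0 [] 0 (by simp) (by intro h; exact absurd (Nat.zero_mod st) h)
    rw [Nat.cast_zero] at hB
    rw [hstc] at hB
    rw [hB]
    have hTlt : 0 < fl.length := by omega
    rw [if_pos hTlt]
    simp only [Nat.zero_div, Nat.sub_zero, List.nil_append]
    rw [List.range_eq_range']
    congr 1
    · congr 1
      have : (fl.length : ℤ) + acs - 1 = ((fl.length + st - 1 : ℕ) : ℤ) := by omega
      rw [hts, this, ← hstc, ← Int.natCast_div, Int.toNat_natCast]
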